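-- pv_equiv track=rewrite | github.com/Hectorg0827/LyoBackendJune | lyo_app/predictive/optimal_timing.py | _find_least_active_hour
-- ===== SOURCE A (Python) =====
-- from typing import Dict, Any, List, Optional, Tuple
--
-- def _find_least_active_hour(
--
--     sessions: List[Dict[str, Any]]
-- ) -> int:
--     """Find hour with fewest sessions (during waking hours)."""
--     if not sessions:
--         return 3  # Default to 3 AM
--
--     # Only consider waking hours (7 AM - 11 PM)
--     waking_hours = range(7, 23)
--     hour_counts = {h: 0 for h in waking_hours}
--
--     for session in sessions:
--         hour = session['hour']
--         if hour in waking_hours: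
--             hour_counts[hour] += 1
--
--     return min(hour_counts, key=hour_counts.get)
-- ===== SOURCE B (Python) =====
-- from typing import Dict, Any, List
--
-- def _find_least_active_hour(
--     sessions: List[Dict[str, Any]]
-- ) -> int:
--     """Find hour with fewest sessions (during waking hours)."""
--     if not sessions:
--         return 3  # Default to 3 AM
--     # For each waking hour, count its sessions directly; min keeps the
--     # first hour (7 -> 22) among ties, matching dict insertion order.
--     return min(range(7, 23),
--                key=lambda h: sum(1 for s in sessions if s['hour'] == h))
-- ===== Notes on version B (the rewrite author's own statement) =====
-- stated objective: simpler
-- what changed: Replaces the pre-initialized counts dict and single tallying pass with a direct min over the waking hours, counting each hour's sessions by a scan inside the key function; no dict is built.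
import Mathlib
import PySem

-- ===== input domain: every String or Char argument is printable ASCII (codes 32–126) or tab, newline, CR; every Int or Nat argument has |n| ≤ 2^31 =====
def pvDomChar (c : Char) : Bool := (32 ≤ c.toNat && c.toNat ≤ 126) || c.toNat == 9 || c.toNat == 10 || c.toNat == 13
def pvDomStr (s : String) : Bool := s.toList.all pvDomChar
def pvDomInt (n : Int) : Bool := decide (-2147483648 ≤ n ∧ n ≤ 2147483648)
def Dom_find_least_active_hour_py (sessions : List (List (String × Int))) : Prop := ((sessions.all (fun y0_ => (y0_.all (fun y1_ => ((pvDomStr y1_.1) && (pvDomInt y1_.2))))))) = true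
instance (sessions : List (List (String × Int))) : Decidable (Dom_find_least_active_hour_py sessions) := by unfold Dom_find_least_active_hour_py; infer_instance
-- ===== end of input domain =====

-- B replaces A's pre-initialized counts dict and tallying pass with a direct min over the
-- waking hours, counting each hour's sessions by a scan inside the key function (simpler, not faster).


-- ===== PORT A =====
-- the 'for session in sessions' tallying loop; 'none' = KeyError on session['hour']
def pvAFold (sessions : List (List (String × Int))) (d : PySem.Dict Int Int) :
    Option (PySem.Dict Int Int) :=
  match sessions with
  | [] => some d
  | s :: rest =>
    match (PySem.Dict.mk s).get? "hour" with
    | none => none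
    | some hour =>
      pvAFold rest
        (if (PySem.List.pyRange 7 23 1).contains hour then d.modify hour 0 (· + 1) else d)

def find_least_active_hour_py (sessions : List (List (String × Int))) : Int :=
  if sessions = [] then 3
  else
    let waking := PySem.List.pyRange 7 23 1
    let hour_counts : PySem.Dict Int Int :=
      waking.foldl (fun d h => d.insert h 0) PySem.Dict.empty
    match pvAFold sessions hour_counts with
    | none => 3  -- KeyError: unreachable under Pre_
    | some d => PySem.List.minD d.keys (fun h => d.getD h 0) 0

-- ===== PORT B =====
-- sum(1 for s in sessions if s['hour'] == h)
def pvBCount (sessions : List (List (String × Int))) (h : Int) : Int :=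
  (sessions.map (fun s => if (PySem.Dict.mk s).get? "hour" = some h then (1 : Int) else 0)).sum

def find_least_active_hour_py_alt (sessions : List (List (String × Int))) : Int :=
  if sessions = [] then 3
  else PySem.List.minD (PySem.List.pyRange 7 23 1) (fun h => pvBCount sessions h) 0

-- ===== PRECONDITION & SPEC =====
-- Pre_ excludes sessions lacking an 'hour' key, on which A raises KeyError.
def Pre_find_least_active_hour_py (sessions : List (List (String × Int))) : Prop :=
  ∀ s ∈ sessions, "hour" ∈ s.map Prod.fst
instance (sessions : List (List (String × Int))) : Decidable (Pre_find_least_active_hour_py sessions) := by unfold Pre_find_least_active_hour_py; infer_instance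
def pvWitness_find_least_active_hour_py : (List (List (String × Int))) := ([[("hour", 8)], [("hour", 8)], [("hour", 12)]])

def Spec_find_least_active_hour_py (sessions : List (List (String × Int))) (out : Int) : Prop := out = find_least_active_hour_py_alt sessions
instance (sessions : List (List (String × Int))) (out : Int) : Decidable (Spec_find_least_active_hour_py sessions out) := by unfold Spec_find_least_active_hour_py; infer_instance

-- ===== CLAIM (what is proved, stated in full; the proofs are below) =====
def Claim_equal_find_least_active_hour_py : Prop := ∀ (sessions : List (List (String × Int))), Dom_find_least_active_hour_py sessions → Pre_find_least_active_hour_py sessions → Spec_find_least_active_hour_py sessions (find_least_active_hour_py sessions)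

-- ===== LEMMAS AND PROOFS =====

-- a session with an 'hour' key yields some value
lemma pvGet_isSome (s : List (String × Int)) (h : "hour" ∈ s.map Prod.fst) :
    ∃ v, (PySem.Dict.mk s).get? "hour" = some v := by
  induction s with
  | nil => simp at h
  | cons p rest ih =>
    rw [PySem.Dict.get?_mk_cons]
    by_cases hp : p.1 == "hour"
    · exact ⟨p.2, by simp [hp]⟩
    · simp only [hp, Bool.false_eq_true, if_false]
      apply ih
      simp only [List.map_cons, List.mem_cons] at h
      rcases h with h | h
      · exact absurd (beq_iff_eq.mpr h.symm) (by simpa using hp)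
      · exact h

-- the initial dict: every waking-hour lookup is 0
lemma pvD0_getD (l : List Int) (d : PySem.Dict Int Int) (hd : ∀ x, d.getD x 0 = 0) (x : Int) :
    (l.foldl (fun d h => d.insert h 0) d).getD x 0 = 0 := by
  induction l generalizing d with
  | nil => exact hd x
  | cons a t ih =>
    simp only [List.foldl_cons]
    exact ih _ (fun y => by rw [PySem.Dict.getD_insert]; split <;> simp [hd])

-- A's tallying loop: succeeds under Pre_, keeps the keys, and for waking h adds B's count
lemma pvAFold_spec (sessions : List (List (String × Int)))
    (hpre : ∀ s ∈ sessions, "hour" ∈ s.map Prod.fst) (d : PySem.Dict Int Int)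
    (hw : ∀ x : Int, 7 ≤ x → x < 23 → x ∈ d.keys) :
    ∃ d', pvAFold sessions d = some d' ∧ d'.keys = d.keys ∧
      ∀ h : Int, 7 ≤ h → h < 23 → d'.getD h 0 = d.getD h 0 + pvBCount sessions h := by
  induction sessions generalizing d with
  | nil => exact ⟨d, rfl, rfl, fun h _ _ => by simp [pvBCount]⟩
  | cons s rest ih =>
    obtain ⟨v, hv⟩ := pvGet_isSome s (hpre s (by simp))
    have hrest : ∀ t ∈ rest, "hour" ∈ t.map Prod.fst := fun t ht => hpre t (by simp [ht])
    set d1 := if (PySem.List.pyRange 7 23 1).contains v then d.modify v 0 (· + 1) else d with hd1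
    have hd1keys : d1.keys = d.keys := by
      rw [hd1]; split
      · rename_i hc
        have hvk : v ∈ d.keys := by
          rw [List.contains_iff_mem, PySem.List.mem_pyRange_one] at hc
          exact hw v hc.1 hc.2
        rw [PySem.Dict.keys_modify,
          PySem.Dict.keys_insert_of_contains _ _ ((PySem.Dict.contains_iff_mem_keys _ _).mpr hvk)]
      · rfl
    obtain ⟨d', hfold, hkeys, hcnt⟩ := ih hrest d1 (fun x h7 h23 => hd1keys ▸ hw x h7 h23)
    refine ⟨d', ?_, ?_, ?_⟩
    · simp only [pvAFold, hv]
      rw [← hd1]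
      exact hfold
    · rw [hkeys, hd1keys]
    · intro h h7 h23
      have hbc : pvBCount (s :: rest) h =
          (if (PySem.Dict.mk s).get? "hour" = some h then (1 : Int) else 0) + pvBCount rest h := by
        simp [pvBCount]
      rw [hcnt h h7 h23, hbc, hd1]
      by_cases hvh : v = h
      · subst hvh
        have hmem : (PySem.List.pyRange 7 23 1).contains v = true := by
          simp [PySem.List.mem_pyRange_one]; omega
        rw [if_pos hmem, PySem.Dict.getD_modify_self, hv]
        simp; ring
      · have hz : (if (PySem.Dict.mk s).get? "hour" = some h then (1 : Int) else 0) = 0 := by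
          rw [hv]; simp [hvh]
        rw [hz]
        split
        · rw [PySem.Dict.getD_modify, if_neg (fun e => hvh e.symm)]; ring
        · ring

-- min? only looks at the key values of the elements
lemma pvMin?_congr {α : Type} (xs : List α) (f g : α → Int)
    (hfg : ∀ x ∈ xs, f x = g x) : PySem.List.min? xs f = PySem.List.min? xs g := by
  unfold PySem.List.min?
  suffices h : ∀ acc : Option α, (∀ m, acc = some m → f m = g m) →
      xs.foldl (fun acc x => match acc with
        | none => some x
        | some m => if f x < f m then some x else some m) acc =
      xs.foldl (fun acc x => match acc with
        | none => some x
        | some m => if g x < g m then some x else some m) acc by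
    exact h none (by simp)
  induction xs with
  | nil => intro acc _; rfl
  | cons a t ih =>
    intro acc hacc
    have ha := hfg a (by simp)
    have hfg' : ∀ x ∈ t, f x = g x := fun x hx => hfg x (by simp [hx])
    simp only [List.foldl_cons]
    cases acc with
    | none => exact ih hfg' (some a) (fun m hm => by cases hm; exact ha)
    | some m0 =>
      have hm0 := hacc m0 rfl
      show t.foldl _ (if f a < f m0 then some a else some m0) =
        t.foldl _ (if g a < g m0 then some a else some m0)
      rw [ha, hm0]
      by_cases hlt : g a < g m0
      · rw [if_pos hlt]
        exact ih hfg' (some a) (fun m hm => by cases hm; exact ha)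
      · rw [if_neg hlt]
        exact ih hfg' (some m0) (fun m hm => by cases hm; exact hm0)

-- ===== VERDICT (by name: the statement is the Claim_ definition above) =====
theorem find_least_active_hour_py_spec : Claim_equal_find_least_active_hour_py := by
  intro sessions _ hpre
  unfold Spec_find_least_active_hour_py find_least_active_hour_py find_least_active_hour_py_alt
  by_cases hnil : sessions = []
  · simp [hnil]
  · simp only [if_neg hnil]
    set d0 : PySem.Dict Int Int :=
      (PySem.List.pyRange 7 23 1).foldl (fun d h => d.insert h 0) PySem.Dict.empty with hd0
    have hkeys0 : d0.keys = PySem.List.pyRange 7 23 1 := by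
      rw [hd0, PySem.Dict.keys_foldl_insert]
      have := PySem.List.nodup_pyRange_one (a := 7) (b := 23)
      simpa [PySem.Set.update_empty] using PySem.Set.ofList_eq_self_of_nodup _ this
    obtain ⟨d', hfold, hkeys, hcnt⟩ := pvAFold_spec sessions hpre d0
      (fun x h7 h23 => by rw [hkeys0, PySem.List.mem_pyRange_one]; exact ⟨h7, h23⟩)
    rw [hfold]
    show PySem.List.minD d'.keys (fun h => d'.getD h 0) 0 = _
    have hd0z : ∀ x, d0.getD x 0 = 0 :=
      fun x => pvD0_getD _ PySem.Dict.empty (fun y => by simp) x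
    rw [hkeys, hkeys0]
    unfold PySem.List.minD
    rw [pvMin?_congr (PySem.List.pyRange 7 23 1) (fun h => d'.getD h 0)
        (fun h => pvBCount sessions h) ?_]
    intro h hh
    rw [PySem.List.mem_pyRange_one] at hh
    show d'.getD h 0 = pvBCount sessions h
    rw [hcnt h hh.1 hh.2, hd0z]
    ring
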